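-- pv_equiv track=rewrite | github.com/lerastromtsova/Scrapy-Top-News | utils.py | unite_news_text_and_topic_name
-- ===== SOURCE A (Python) =====
-- def unite_news_text_and_topic_name(news_text, topic_name):
--     inters = set()
--     for word in topic_name:
--         for word2 in news_text:
--             if word == word2:
--                 inters.add(word)
--             elif word2 in word.split():
--                 if len(word.split()) >= 2:
--                     idx = word.split().index(word2)
--                     if idx != 0:
--                         inters.add(word)
--
--     return inters
-- ===== SOURCE B (Python) =====
-- def unite_news_text_and_topic_name(news_text, topic_name):
--     # inverted index: trigger token -> positions of the topic words it activates
--     index = {}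
--     for i, word in enumerate(topic_name):
--         tokens = word.split()
--         triggers = [word]
--         if len(tokens) >= 2:
--             triggers += [t for t in tokens if t != tokens[0]]
--         for t in triggers:
--             index.setdefault(t, []).append(i)
--     hit = set()
--     for w2 in news_text:
--         hit.update(index.get(w2, []))
--     return {topic_name[i] for i in sorted(hit)}
-- ===== Notes on version B (the rewrite author's own statement) =====
-- stated objective: faster
-- what changed: B inverts the data flow: one pass over topic_name builds an inverted index from each trigger token (the word itself, plus its non-first tokens when it has >=2 tokens) to the topic positions it activates, then a single lookup pass over news_text collects the hit positions, which are emitted in index order; A's nested topic x news scan with word.split() recomputed inside the inner loop disappears.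
import Mathlib
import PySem

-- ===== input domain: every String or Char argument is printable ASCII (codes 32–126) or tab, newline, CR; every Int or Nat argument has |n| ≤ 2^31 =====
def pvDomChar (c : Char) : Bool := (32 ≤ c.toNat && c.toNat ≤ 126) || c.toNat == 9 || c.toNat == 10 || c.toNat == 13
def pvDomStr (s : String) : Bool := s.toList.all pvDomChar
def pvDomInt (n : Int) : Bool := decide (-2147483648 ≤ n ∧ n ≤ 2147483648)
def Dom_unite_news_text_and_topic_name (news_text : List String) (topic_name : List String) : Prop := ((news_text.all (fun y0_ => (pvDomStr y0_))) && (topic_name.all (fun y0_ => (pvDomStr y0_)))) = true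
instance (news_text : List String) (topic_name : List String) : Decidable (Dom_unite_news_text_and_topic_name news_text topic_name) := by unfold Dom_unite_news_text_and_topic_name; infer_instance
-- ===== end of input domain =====

-- B replaces A's nested topic×news scan by an inverted index (trigger token -> topic positions) built in one pass over topic_name, then a single lookup pass over news_text; faster by removing the inner scan and the repeated word.split() calls.


-- ===== PORT A =====
-- one body of A's inner loop: the if/elif chain on (word, word2)
def pvAStep (word : String) (inters : List String) (word2 : String) : List String :=
  if word == word2 then PySem.Set.add inters word
  else if (PySem.Str.split₀ word).contains word2 then
    if 2 ≤ (PySem.Str.split₀ word).length then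
      match PySem.List.index? (PySem.Str.split₀ word) word2 with
      | some idx => if idx ≠ 0 then PySem.Set.add inters word else inters
      | none => inters
    else inters
  else inters

def unite_news_text_and_topic_name (news_text : List String) (topic_name : List String) : List String :=
  topic_name.foldl (fun inters word => news_text.foldl (pvAStep word) inters) []

-- ===== PORT B =====
-- triggers = [word] (+ the tokens differing from tokens[0], when there are ≥ 2 tokens)
def pvTriggers (word : String) : List String :=
  match PySem.Str.split₀ word with
  | [] => [word]
  | t0 :: tl =>
    [word] ++ (if 2 ≤ (t0 :: tl).length then (t0 :: tl).filter (fun t => t != t0) else [])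

-- first pass: inverted index  trigger token -> positions (in topic_name) it activates
def pvBuildIndex (topic_name : List String) : PySem.Dict String (List Int) :=
  (PySem.List.enumerate topic_name).foldl
    (fun index p =>
      (pvTriggers p.2).foldl
        (fun d t => PySem.Dict.modify d t [] (fun l => l ++ [p.1])) index)
    PySem.Dict.empty

def unite_news_text_and_topic_name_alt (news_text : List String) (topic_name : List String) : List String :=
  let index := pvBuildIndex topic_name
  let hit : PySem.Set Int :=
    news_text.foldl (fun h w2 => PySem.Set.update h (PySem.Dict.getD index w2 [])) PySem.Set.empty
  (PySem.List.sorted hit (fun x => x)).foldl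
    (fun s i => PySem.Set.add s (PySem.List.pyGetD topic_name i "")) PySem.Set.empty

-- ===== PRECONDITION & SPEC =====
def Spec_unite_news_text_and_topic_name (news_text : List String) (topic_name : List String) (out : List String) : Prop := out = unite_news_text_and_topic_name_alt news_text topic_name
instance (news_text : List String) (topic_name : List String) (out : List String) : Decidable (Spec_unite_news_text_and_topic_name news_text topic_name out) := by unfold Spec_unite_news_text_and_topic_name; infer_instance

-- ===== CLAIM (what is proved, stated in full; the proofs are below) =====
def Claim_equal_unite_news_text_and_topic_name : Prop := ∀ (news_text : List String) (topic_name : List String), Dom_unite_news_text_and_topic_name news_text topic_name → Spec_unite_news_text_and_topic_name news_text topic_name (unite_news_text_and_topic_name news_text topic_name)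

-- ===== LEMMAS AND PROOFS =====

-- the condition under which the pair (word, word2) makes A's if/elif chain add `word`
def pvTrig (word word2 : String) : Bool :=
  word == word2 ||
    ((PySem.Str.split₀ word).contains word2 &&
      decide (2 ≤ (PySem.Str.split₀ word).length) &&
      decide (PySem.List.index? (PySem.Str.split₀ word) word2 ≠ some 0))

theorem pv_step_eq (word : String) (inters : List String) (word2 : String) :
    pvAStep word inters word2 =
      if pvTrig word word2 then PySem.Set.add inters word else inters := by
  unfold pvAStep pvTrig
  by_cases heq : (word == word2) = true
  · simp [heq]
  · by_cases hmem : ((PySem.Str.split₀ word).contains word2) = true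
    · have hmem' : word2 ∈ PySem.Str.split₀ word := by simpa using hmem
      have hs : (PySem.List.index? (PySem.Str.split₀ word) word2).isSome := by
        rw [PySem.List.index?_isSome_iff]; exact hmem'
      obtain ⟨idx, hidx⟩ := Option.isSome_iff_exists.mp hs
      simp only [PySem.List.index?_eq_idxOf?] at hidx
      by_cases hlen : 2 ≤ (PySem.Str.split₀ word).length
      · by_cases h0 : idx = 0 <;> simp [heq, hmem', hlen, hidx, h0]
      · simp [heq, hmem', hlen]
    · have hmem' : word2 ∉ PySem.Str.split₀ word := by simpa using hmem
      simp [heq, hmem']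

-- A's inner loop over news_text adds `word` exactly when some news word triggers the chain
theorem pv_inner_eq (word : String) :
    ∀ (news inters : List String),
      news.foldl (pvAStep word) inters =
        if news.any (pvTrig word) then PySem.Set.add inters word else inters := by
  intro news
  induction news with
  | nil => intro inters; simp
  | cons w2 rest ih =>
    intro inters
    rw [List.foldl_cons, pv_step_eq, List.any_cons]
    by_cases h : pvTrig word w2
    · simp [h, ih]
    · simp [h, ih]

-- A's whole result is set(filter) in topic order
theorem pvA_eq_ofList_filter (news topic : List String) :
    unite_news_text_and_topic_name news topic =
      PySem.Set.ofList (topic.filter (fun w => news.any (pvTrig w))) := by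
  unfold unite_news_text_and_topic_name
  have h1 : (fun (inters : List String) (word : String) => news.foldl (pvAStep word) inters) =
      (fun inters word =>
        if news.any (pvTrig word) then PySem.Set.add inters word else inters) := by
    funext inters word; rw [pv_inner_eq]
  rw [h1, ← List.foldl_filter]
  rfl

-- trigger-list membership is exactly A's chain condition
theorem pv_mem_triggers (word t : String) :
    t ∈ pvTriggers word ↔ pvTrig word t = true := by
  unfold pvTriggers pvTrig
  cases htok : PySem.Str.split₀ word with
  | nil =>
    simp only [htok, List.contains_eq_mem, List.not_mem_nil, decide_false, Bool.false_and,
      Bool.and_false, Bool.or_false, List.mem_singleton, beq_iff_eq]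
    exact ⟨fun h => h.symm, fun h => h.symm⟩
  | cons t0 tl =>
    by_cases hlen : 2 ≤ (t0 :: tl).length
    · simp only [htok, if_pos hlen, List.mem_append, List.mem_singleton, List.mem_filter,
        bne_iff_ne, Bool.or_eq_true, beq_iff_eq, Bool.and_eq_true, decide_eq_true_eq,
        List.contains_eq_mem, List.mem_cons, List.not_mem_nil, or_false]
      constructor
      · rintro (h | ⟨hmem, hne⟩)
        · exact Or.inl h.symm
        · refine Or.inr ⟨⟨hmem, hlen⟩, ?_⟩
          rw [PySem.List.index?_cons_of_ne _ (fun h => hne h.symm)]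
          simp
      · rintro (h | ⟨⟨hmem, _⟩, hidx⟩)
        · exact Or.inl h.symm
        · refine Or.inr ⟨hmem, ?_⟩
          intro h
          apply hidx
          rw [h]
          exact PySem.List.index?_cons_self t0 tl
    · simp only [htok, if_neg hlen, List.append_nil, List.mem_singleton, Bool.or_eq_true,
        beq_iff_eq, Bool.and_eq_true, decide_eq_true_eq, List.not_mem_nil, or_false]
      constructor
      · intro h; exact Or.inl h.symm
      · rintro (h | ⟨⟨_, h2⟩, _⟩)
        · exact h.symm
        · exact absurd h2 hlen

-- flattened view of the index build (nested folds = one fold over the token/position pairs)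
def pvFlatPairs (topic : List String) : List (String × Int) :=
  (PySem.List.enumerate topic).flatMap (fun p => (pvTriggers p.2).map (fun t => (t, p.1)))

theorem pv_buildIndex_getD (topic : List String) (c : String) :
    PySem.Dict.getD (pvBuildIndex topic) c [] =
      ((pvFlatPairs topic).filter (fun p => p.1 == c)).map (fun p => p.2) := by
  have hflat : pvBuildIndex topic =
      (pvFlatPairs topic).foldl
        (fun d p => PySem.Dict.modify d p.1 [] (fun l => l ++ [p.2])) PySem.Dict.empty := by
    unfold pvBuildIndex pvFlatPairs
    rw [List.foldl_flatMap]
    congr 1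
    funext d p
    rw [List.foldl_map]
  rw [hflat, PySem.Dict.getD_foldl_modify_append]
  rfl

theorem pv_mem_index (topic : List String) (c : String) (x : Int) :
    x ∈ PySem.Dict.getD (pvBuildIndex topic) c [] ↔
      ∃ p ∈ PySem.List.enumerate topic, c ∈ pvTriggers p.2 ∧ x = p.1 := by
  rw [pv_buildIndex_getD]
  simp only [List.mem_map, List.mem_filter, pvFlatPairs, List.mem_flatMap, beq_iff_eq]
  constructor
  · rintro ⟨⟨t, i⟩, ⟨⟨⟨j, w⟩, hpe, ht⟩, hc⟩, hx⟩
    simp only [List.mem_map, Prod.mk.injEq] at ht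
    obtain ⟨t', ht', h1, h2⟩ := ht
    exact ⟨(j, w), hpe, by simp_all⟩
  · rintro ⟨⟨j, w⟩, hpe, hc, hx⟩
    exact ⟨(c, j), ⟨⟨(j, w), hpe, by simpa using hc⟩, rfl⟩, hx.symm⟩

-- membership in the hit set collected over news_text
theorem pv_mem_hitFold (index : PySem.Dict String (List Int)) :
    ∀ (news : List String) (init : PySem.Set Int) (x : Int),
      (x ∈ news.foldl (fun h w2 => PySem.Set.update h (PySem.Dict.getD index w2 [])) init) ↔
        x ∈ init ∨ ∃ w2 ∈ news, x ∈ PySem.Dict.getD index w2 [] := by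
  intro news
  induction news with
  | nil => intro init x; simp
  | cons w rest ih =>
    intro init x
    rw [List.foldl_cons, ih]
    rw [PySem.Set.mem_update]
    simp only [List.mem_cons]
    constructor
    · rintro ((h | h) | h)
      · exact Or.inl h
      · exact Or.inr ⟨w, Or.inl rfl, h⟩
      · obtain ⟨w2, hw2, hx⟩ := h; exact Or.inr ⟨w2, Or.inr hw2, hx⟩
    · rintro (h | ⟨w2, (rfl | hw2), hx⟩)
      · exact Or.inl (Or.inl h)
      · exact Or.inl (Or.inr hx)
      · exact Or.inr ⟨w2, hw2, hx⟩

theorem pv_nodup_hitFold (index : PySem.Dict String (List Int)) :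
    ∀ (news : List String) (init : PySem.Set Int), init.Nodup →
      (news.foldl (fun h w2 => PySem.Set.update h (PySem.Dict.getD index w2 [])) init).Nodup := by
  intro news
  induction news with
  | nil => intro init h; exact h
  | cons w rest ih =>
    intro init h
    exact ih _ (PySem.Set.nodup_update _ _ h)

-- the ordered list of matching positions
def pvHitList (news topic : List String) : List Int :=
  ((PySem.List.enumerate topic).filter (fun p => news.any (pvTrig p.2))).map (fun p => p.1)

theorem pv_hitList_pairwise (news topic : List String) :
    (pvHitList news topic).Pairwise (fun a b => a < b) := by
  have h0 : ((PySem.List.enumerate topic).map (fun p => p.1)).Pairwise (fun a b => a < b) := by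
    rw [PySem.List.map_fst_enumerate]
    exact PySem.List.pairwise_lt_pyRange_one 0 (0 + topic.length)
  have hsub : (pvHitList news topic).Sublist ((PySem.List.enumerate topic).map (fun p => p.1)) :=
    List.Sublist.map _ List.filter_sublist
  exact h0.sublist hsub

-- each enumerate pair indexes to its own element
theorem pv_enumerate_getD (topic : List String) :
    ∀ p ∈ PySem.List.enumerate topic, PySem.List.pyGetD topic p.1 "" = p.2 := by
  have key : ∀ (l : List String) (s : Int) (p : Int × String), p ∈ PySem.List.enumerate l s →
      ∃ k : Nat, ∃ _ : k < l.length, p.1 = s + ↑k ∧ p.2 = l[k] := by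
    intro l
    induction l with
    | nil => intro s p h; simp [PySem.List.enumerate_nil] at h
    | cons x xs ih =>
      intro s p h
      rw [PySem.List.enumerate_cons, List.mem_cons] at h
      rcases h with rfl | h
      · exact ⟨0, by simp, by simp, by simp⟩
      · obtain ⟨k, hk, h1, h2⟩ := ih (s + 1) p h
        exact ⟨k + 1, by simp only [List.length_cons]; omega, by push_cast; omega, by simpa using h2⟩
  intro p hp
  obtain ⟨k, hk, h1, h2⟩ := key topic 0 p hp
  rw [h2, h1, zero_add]
  simp [hk]

theorem pv_hitList_map (news topic : List String) :
    (pvHitList news topic).map (fun i => PySem.List.pyGetD topic i "") =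
      topic.filter (fun w => news.any (pvTrig w)) := by
  unfold pvHitList
  rw [List.map_map]
  have h1 : ((PySem.List.enumerate topic).filter (fun p => news.any (pvTrig p.2))).map
        ((fun i => PySem.List.pyGetD topic i "") ∘ (fun p => p.1)) =
      ((PySem.List.enumerate topic).filter (fun p => news.any (pvTrig p.2))).map (fun p => p.2) := by
    apply List.map_congr_left
    intro p hp
    exact pv_enumerate_getD topic p (List.mem_of_mem_filter hp)
  rw [h1]
  have h2 : topic.filter (fun w => news.any (pvTrig w)) =
      ((PySem.List.enumerate topic).map (fun p => p.2)).filter (fun w => news.any (pvTrig w)) := by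
    rw [PySem.List.map_snd_enumerate]
  rw [h2, List.filter_map]
  rfl

-- ===== VERDICT (by name: the statement is the Claim_ definition above) =====
theorem unite_news_text_and_topic_name_spec : Claim_equal_unite_news_text_and_topic_name := by
  intro news topic _
  unfold Spec_unite_news_text_and_topic_name unite_news_text_and_topic_name_alt
  dsimp only
  rw [pvA_eq_ofList_filter]
  have hsorted : PySem.List.sorted
      (news.foldl (fun h w2 => PySem.Set.update h (PySem.Dict.getD (pvBuildIndex topic) w2 []))
        PySem.Set.empty) (fun x => x) = pvHitList news topic := by
    apply PySem.List.sorted_eq_of_perm_of_pairwise_lt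
    · rw [List.perm_ext_iff_of_nodup
        ((pv_hitList_pairwise news topic).imp (fun h => ne_of_lt h))
        (pv_nodup_hitFold _ news PySem.Set.empty List.nodup_nil)]
      intro x
      rw [pv_mem_hitFold]
      unfold pvHitList
      simp only [List.mem_map, List.mem_filter, PySem.Set.empty_eq, List.not_mem_nil,
        false_or]
      constructor
      · rintro ⟨p, ⟨hp, hany⟩, hx⟩
        rcases List.any_eq_true.mp hany with ⟨w2, hw2, htr⟩
        exact ⟨w2, hw2, (pv_mem_index topic w2 x).2 ⟨p, hp, (pv_mem_triggers _ _).2 htr, hx.symm⟩⟩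
      · rintro ⟨w2, hw2, hx⟩
        obtain ⟨p, hp, hc, hx'⟩ := (pv_mem_index topic w2 x).1 hx
        exact ⟨p, ⟨hp, List.any_eq_true.mpr ⟨w2, hw2, (pv_mem_triggers _ _).1 hc⟩⟩, hx'.symm⟩
    · exact pv_hitList_pairwise news topic
  rw [hsorted, ← pv_hitList_map news topic, ← List.foldl_map]
  rfl
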